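-- pv_equiv track=rewrite | github.com/tldr-group/HR-Dv2 | hr_dv2/transform.py | compute_shift_directions
-- ===== SOURCE A (Python) =====
-- from typing import List, Literal, TypeAlias, Tuple, Callable
--
-- def compute_shift_directions(
--     pattern: Literal["Neumann", "Moore"]
-- ) -> List[Tuple[int, int]]:
--     # Precompute neighbourhood shift unit vectors
--     shifts = [  # shifts in yx format
--         (-1, -1),
--         (-1, 0),
--         (-1, 1),
--         (0, -1),
--         (0, 0),
--         (0, 1),
--         (1, -1),
--         (1, 0),
--         (1, 1),
--     ]
--     shift_directions: List[Tuple[int, int]] = []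
--     for i in range(9):
--         if pattern == "Neumann" and i % 2 == 1:
--             shift_directions.append(shifts[i])
--         elif pattern == "Moore" and i != 4:
--             shift_directions.append(shifts[i])
--     return shift_directions
-- ===== SOURCE B (Python) =====
-- NEIGHBOURHOODS = {
--     "Neumann": [(-1, 0), (0, -1), (0, 1), (1, 0)],
--     "Moore": [(-1, -1), (-1, 0), (-1, 1), (0, -1), (0, 1), (1, -1), (1, 0), (1, 1)],
-- }
--
-- def compute_shift_directions(pattern):
--     # Closed-form lookup: each pattern maps directly to its neighbourhood list.
--     return NEIGHBOURHOODS.get(pattern, [])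
-- ===== Notes on version B (the rewrite author's own statement) =====
-- stated objective: simpler
-- what changed: B replaces A's loop over indices 0..8 with index-arithmetic filtering (i % 2, i != 4) of a 9-entry table by a single closed-form dictionary lookup mapping each pattern name directly to its precomputed neighbourhood list (empty list for unknown patterns); no loop or filtering happens at all.
import Mathlib
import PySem

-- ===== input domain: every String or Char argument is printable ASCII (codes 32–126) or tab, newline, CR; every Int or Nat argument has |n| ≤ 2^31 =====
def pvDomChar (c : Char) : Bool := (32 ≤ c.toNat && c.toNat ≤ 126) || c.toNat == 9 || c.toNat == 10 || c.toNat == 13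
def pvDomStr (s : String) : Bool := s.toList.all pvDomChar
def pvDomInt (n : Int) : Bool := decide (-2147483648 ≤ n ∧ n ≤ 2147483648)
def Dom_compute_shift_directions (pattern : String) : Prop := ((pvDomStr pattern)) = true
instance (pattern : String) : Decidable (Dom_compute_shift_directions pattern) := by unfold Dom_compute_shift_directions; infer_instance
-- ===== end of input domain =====

-- B replaces A's index-filtered loop over a 9-entry table with a single dictionary lookup mapping each pattern to its precomputed list (simpler; same behaviour).

-- ===== PORT A =====
def compute_shift_directions (pattern : String) : List (Int × Int) :=
  let shifts : List (Int × Int) :=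
    [(-1, -1), (-1, 0), (-1, 1), (0, -1), (0, 0), (0, 1), (1, -1), (1, 0), (1, 1)]
  (PySem.List.pyRange 0 9 1).foldl
    (fun (shift_directions : List (Int × Int)) (i : Int) =>
      if pattern == "Neumann" && PySem.Int.mod i 2 == 1 then
        shift_directions ++ ((PySem.List.pyGet? shifts i).map (fun s => [s])).getD []
      else if pattern == "Moore" && i != 4 then
        shift_directions ++ ((PySem.List.pyGet? shifts i).map (fun s => [s])).getD []
      else shift_directions) []

-- ===== PORT B =====
-- module-level constant dict NEIGHBOURHOODS
def NEIGHBOURHOODS : PySem.Dict String (List (Int × Int)) :=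
  ((PySem.Dict.empty).insert "Neumann" [(-1, 0), (0, -1), (0, 1), (1, 0)]).insert
    "Moore" [(-1, -1), (-1, 0), (-1, 1), (0, -1), (0, 1), (1, -1), (1, 0), (1, 1)]

def compute_shift_directions_alt (pattern : String) : List (Int × Int) :=
  NEIGHBOURHOODS.getD pattern []

-- ===== PRECONDITION & SPEC =====
def Spec_compute_shift_directions (pattern : String) (out : List (Int × Int)) : Prop := out = compute_shift_directions_alt pattern
instance (pattern : String) (out : List (Int × Int)) : Decidable (Spec_compute_shift_directions pattern out) := by unfold Spec_compute_shift_directions; infer_instance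

-- ===== CLAIM =====
def Claim_equal_compute_shift_directions : Prop := ∀ (pattern : String), Dom_compute_shift_directions pattern → Spec_compute_shift_directions pattern (compute_shift_directions pattern)

-- ===== LEMMAS AND PROOFS =====

-- ===== VERDICT =====
theorem compute_shift_directions_spec : Claim_equal_compute_shift_directions := by
  intro pattern _
  unfold Spec_compute_shift_directions compute_shift_directions compute_shift_directions_alt NEIGHBOURHOODS
  by_cases hN : pattern = "Neumann"
  · subst hN; decide
  · by_cases hM : pattern = "Moore"
    · subst hM; decide
    · have hN' : (pattern == "Neumann") = false := by simp [hN]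
      have hM' : (pattern == "Moore") = false := by simp [hM]
      simp [hN', hM', PySem.List.pyRange, PySem.Dict.getD, PySem.Dict.get?,
        PySem.Dict.insert, PySem.Dict.empty, Ne.symm hN, Ne.symm hM]
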